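-- pv_equiv track=rewrite | github.com/TimLaszlo004/hackathon | palindrome_checker/main.py | palindromize
-- ===== SOURCE A (Python) =====
-- def palindromize(word):
--     unique = list()
--     length = len(word)//2
--     if len(word)%2==1:
--         length += 1
--     for i in range(length):
--         if word[i] != word[-i-1]:
--             return -1
--         else:
--             unique.append(word[i])
--     un = set(unique)
--     return len(un)
-- ===== SOURCE B (Python) =====
-- def palindromize(word):
--     if word != word[::-1]:
--         return -1
--     return len(set(word[:(len(word) + 1) // 2]))
-- ===== Notes on version B (the rewrite author's own statement) =====
-- stated objective: simpler
-- what changed: Replaces the fused half-length mirror loop that simultaneously verifies mirror positions and collects characters with two separate steps: a whole-string reverse comparison, then counting distinct characters of the first ceil(n/2) slice.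
import Mathlib
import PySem

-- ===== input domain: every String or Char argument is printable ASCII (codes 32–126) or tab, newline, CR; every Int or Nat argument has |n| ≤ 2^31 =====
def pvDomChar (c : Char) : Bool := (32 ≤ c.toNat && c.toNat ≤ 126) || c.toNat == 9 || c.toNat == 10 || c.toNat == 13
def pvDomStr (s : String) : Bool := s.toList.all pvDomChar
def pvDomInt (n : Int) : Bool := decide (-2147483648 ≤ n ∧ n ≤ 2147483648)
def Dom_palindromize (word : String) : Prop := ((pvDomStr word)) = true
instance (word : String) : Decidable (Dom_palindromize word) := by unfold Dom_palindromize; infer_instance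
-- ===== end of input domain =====

-- B separates A's fused verify-and-collect half-length mirror loop into a whole-string
-- reverse comparison followed by a distinct-count of the first ceil(n/2) characters (simpler).

-- ===== PORT A =====
-- the for-loop of A: indices to visit, accumulated `unique` list; `none` = the `return -1` branch
def palinLoopA (cs : List Char) : List Int → List Char → Option (List Char)
  | [], unique => some unique
  | i :: rest, unique =>
      if PySem.List.pyGetD cs i ' ' ≠ PySem.List.pyGetD cs (-i - 1) ' ' then none
      else palinLoopA cs rest (unique ++ [PySem.List.pyGetD cs i ' '])

def palindromize (word : String) : Int :=
  let cs := word.toList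
  let length : Int :=
    PySem.Int.floordiv cs.length 2 +
      (if PySem.Int.mod cs.length 2 = 1 then 1 else 0)
  match palinLoopA cs (PySem.List.pyRange 0 length 1) [] with
  | none => -1
  | some unique => ((PySem.Set.ofList unique).length : Int)

-- ===== PORT B =====
def palindromize_alt (word : String) : Int :=
  let cs := word.toList
  if cs ≠ cs.reverse then -1
  else ((PySem.Set.ofList (cs.take ((cs.length + 1) / 2))).length : Int)

-- ===== PRECONDITION & SPEC =====
def Spec_palindromize (word : String) (out : Int) : Prop := out = palindromize_alt word
instance (word : String) (out : Int) : Decidable (Spec_palindromize word out) := by unfold Spec_palindromize; infer_instance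

-- ===== CLAIM (what is proved, stated in full; the proofs are below) =====
def Claim_equal_palindromize : Prop := ∀ (word : String), Dom_palindromize word → Spec_palindromize word (palindromize word)

-- ===== LEMMAS AND PROOFS =====

-- the loop as a map guarded by an `all` check
theorem palinLoopA_eq (cs : List Char) (idxs : List Int) (u : List Char) :
    palinLoopA cs idxs u =
      if idxs.all (fun i => PySem.List.pyGetD cs i ' ' = PySem.List.pyGetD cs (-i - 1) ' ') then
        some (u ++ idxs.map (fun i => PySem.List.pyGetD cs i ' '))
      else none := by
  induction idxs generalizing u with
  | nil => simp [palinLoopA]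
  | cons i rest ih =>
      simp only [palinLoopA, List.all_cons, List.map_cons]
      by_cases h : PySem.List.pyGetD cs i ' ' = PySem.List.pyGetD cs (-i - 1) ' '
      · simp [h, ih]
      · simp [h]

theorem pyGetD_nat (cs : List Char) (k : Nat) (h : k < cs.length) :
    PySem.List.pyGetD cs (k : Int) ' ' = cs.getD k ' ' := by
  simp [PySem.List.pyGetD_natCast, h]

theorem pyGetD_neg (cs : List Char) (k : Nat) (h : k < cs.length) :
    PySem.List.pyGetD cs (-(k : Int) - 1) ' ' = cs.getD (cs.length - 1 - k) ' ' := by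
  have h1 : ¬ (1 ≤ -(k:Int)) := by omega
  have h2 : (1 + (k:Int)).toNat = 1 + k := by omega
  have h3 : cs.length - (1 + k) = cs.length - 1 - k := by omega
  have h4 : cs.length - 1 - k < cs.length := by omega
  simp [PySem.List.pyGetD, PySem.List.pyGet?, PySem.List.pyIdx?, h1, h, h2, h3,
    List.getElem?_eq_getElem h4]

-- a palindrome mirrors each position of the first ceil-half
theorem half_rev (cs : List Char) (hp : cs = cs.reverse) (k : Nat) (hk : k < cs.length) :
    cs.getD k ' ' = cs.getD (cs.length - 1 - k) ' ' := by
  have h2 : cs.length - 1 - k < cs.length := by omega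
  rw [List.getD_eq_getElem _ _ hk, List.getD_eq_getElem _ _ h2]
  have hrev : cs[k] = (cs.reverse)[k]'(by simpa using hk) := List.getElem_of_eq hp hk
  rw [hrev, List.getElem_reverse]

-- the half-check suffices for palindromicity
theorem half_to_pal (cs : List Char)
    (hf : ∀ k < (cs.length + 1) / 2, cs.getD k ' ' = cs.getD (cs.length - 1 - k) ' ') :
    cs = cs.reverse := by
  apply List.ext_getElem (by simp)
  intro i hi hi'
  rw [List.getElem_reverse]
  by_cases hc : i < (cs.length + 1) / 2
  · have := hf i hc
    rw [List.getD_eq_getElem _ _ hi,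
        List.getD_eq_getElem _ _ (by omega : cs.length - 1 - i < cs.length)] at this
    exact this
  · have hj : cs.length - 1 - i < (cs.length + 1) / 2 := by omega
    have := (hf _ hj).symm
    rw [List.getD_eq_getElem _ _ (by omega : cs.length - 1 - i < cs.length),
        List.getD_eq_getElem _ _ (by omega : cs.length - 1 - (cs.length - 1 - i) < cs.length)] at this
    have hii : cs.length - 1 - (cs.length - 1 - i) = i := by omega
    simpa [hii] using this

-- the characters A collects are exactly the first-half prefix
theorem map_half_take (cs : List Char) (l : Nat) (hl : l ≤ cs.length) :
    (List.range l).map (fun k => cs.getD k ' ') = cs.take l := by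
  apply List.ext_getElem (by simp [hl])
  intro i hi hi'
  simp at hi
  simp [List.getElem_take, List.getElem?_eq_getElem (show i < cs.length by omega)]

-- ===== VERDICT (by name: the statement is the Claim_ definition above) =====
theorem palindromize_spec : Claim_equal_palindromize := by
  intro word _
  unfold Spec_palindromize
  simp only [palindromize, palindromize_alt]
  set cs := word.toList with hcs
  set n := cs.length with hn
  set l := (n + 1) / 2 with hldef
  have hln : l ≤ n := by omega
  have hL : (PySem.Int.floordiv (n : Int) 2 +
      (if PySem.Int.mod (n : Int) 2 = 1 then (1 : Int) else 0)) = (l : Int) := by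
    have h1 : PySem.Int.floordiv (n:Int) 2 = ((n/2 : Nat) : Int) := by
      exact_mod_cast PySem.Int.floordiv_natCast n 2
    have h2 : PySem.Int.mod (n:Int) 2 = ((n%2 : Nat) : Int) := by
      exact_mod_cast PySem.Int.mod_natCast n 2
    rw [h1, h2]
    split_ifs with h <;> omega
  rw [hL, PySem.List.pyRange_one, palinLoopA_eq]
  have hrange : ((l:Int) - 0).toNat = l := by omega
  rw [hrange]
  by_cases hpal : cs = cs.reverse
  · have hall : ((List.range l).map (fun k : Nat => (0:Int) + ↑k)).all
        (fun i => decide (PySem.List.pyGetD cs i ' ' = PySem.List.pyGetD cs (-i - 1) ' ')) = true := by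
      rw [List.all_map, List.all_eq_true]
      intro k hk
      rw [List.mem_range] at hk
      have hkn : k < n := by omega
      simp only [Function.comp, zero_add, decide_eq_true_eq]
      rw [pyGetD_nat cs k hkn, pyGetD_neg cs k hkn]
      exact half_rev cs hpal k hkn
    rw [if_pos hall, if_neg (by simpa using hpal)]
    simp only [List.nil_append, List.map_map]
    have hmaps : ((List.range l).map ((fun i => PySem.List.pyGetD cs i ' ') ∘ (fun k : Nat => (0:Int) + ↑k)))
        = cs.take l := by
      rw [← map_half_take cs l hln]
      apply List.map_congr_left
      intro k hk
      rw [List.mem_range] at hk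
      simp only [Function.comp, zero_add]
      exact pyGetD_nat cs k (by omega)
    rw [hmaps]
  · cases hb : ((List.range l).map (fun k : Nat => (0:Int) + ↑k)).all
        (fun i => decide (PySem.List.pyGetD cs i ' ' = PySem.List.pyGetD cs (-i - 1) ' ')) with
    | true =>
        exfalso
        apply hpal
        apply half_to_pal
        intro k hk
        have hkn : k < n := by omega
        have hmem : ((0:Int) + ↑k) ∈ (List.range l).map (fun k : Nat => (0:Int) + ↑k) :=
          List.mem_map.mpr ⟨k, List.mem_range.mpr hk, rfl⟩
        have := List.all_eq_true.mp hb _ hmem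
        simp only [decide_eq_true_eq, zero_add] at this
        rw [pyGetD_nat cs k hkn, pyGetD_neg cs k hkn] at this
        exact this
    | false =>
        rw [if_neg (by simp), if_pos (by simpa using hpal)]
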